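-- pv_equiv track=rewrite | github.com/dstch/sql-detector-agent-test | agent/knowledge_tools.py | split_segments_by_headers
-- ===== SOURCE A (Python) =====
-- def split_segments_by_headers(content: str) -> list[tuple[str, str]]:
--     """按 ## 二级标题拆分内容为片段
--
--     Returns:
--         list of (title, content) tuples
--     """
--     segments = []
--
--     parts = content.split("\n## ")
--     for i, part in enumerate(parts):
--         if i == 0:
--             continue
--
--         lines = part.split("\n", 1)
--         if len(lines) >= 2:
--             title = lines[0].strip()
--             body = lines[1].strip()
--             segments.append((title, body))
--         elif lines:
--             title = lines[0].strip()
--             segments.append((title, ""))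
--
--     return segments
-- ===== SOURCE B (Python) =====
-- def split_segments_by_headers(content: str) -> list[tuple[str, str]]:
--     """Split content into (title, body) segments at '## ' level-2 header lines.
--
--     Single line scan with running state instead of nested str.split passes.
--     """
--     segments = []
--     title = None
--     body = []
--     for i, line in enumerate(content.split("\n")):
--         if i > 0 and line.startswith("## "):
--             if title is not None:
--                 segments.append((title, "\n".join(body).strip()))
--             title = line[3:].strip()
--             body = []
--         elif title is not None:
--             body.append(line)
--     if title is not None:
--         segments.append((title, "\n".join(body).strip()))
--     return segments
-- ===== Notes on version B (the rewrite author's own statement) =====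
-- stated objective: alternative
-- what changed: Replaces A's two-level splitting (split the whole text on "\n## ", then re-split each part on "\n" with maxsplit 1) by a single scan over the lines with a running (title, body-lines) state that flushes a segment at each header line.
import Mathlib
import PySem

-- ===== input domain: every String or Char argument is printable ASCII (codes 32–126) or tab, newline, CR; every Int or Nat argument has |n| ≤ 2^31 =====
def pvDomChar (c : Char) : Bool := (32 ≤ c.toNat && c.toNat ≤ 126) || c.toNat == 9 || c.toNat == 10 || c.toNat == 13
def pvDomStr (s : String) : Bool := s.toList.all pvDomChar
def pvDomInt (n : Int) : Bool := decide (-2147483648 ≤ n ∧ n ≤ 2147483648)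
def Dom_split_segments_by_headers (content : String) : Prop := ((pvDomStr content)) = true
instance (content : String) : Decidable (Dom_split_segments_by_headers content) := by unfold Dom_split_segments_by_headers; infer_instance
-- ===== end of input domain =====

-- B replaces A's nested str.split passes (split on "\n## ", then re-split each part) by a
-- single scan over the lines with a running (title, body) state: objective 'alternative'.

-- ===== PORT A =====
-- loop body of A's 'for i, part in enumerate(parts)'
def stepA (segs : List (List Char × List Char)) (ip : Int × List Char) : List (List Char × List Char) :=
  if ip.1 == 0 then segs
  else
    let lines := PySem.Chars.splitOnMax ip.2 ['\n'] 1     -- part.split("\n", 1)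
    if 2 ≤ lines.length then
      segs ++ [(PySem.Chars.strip (lines.getD 0 []), PySem.Chars.strip (lines.getD 1 []))]
    else if lines.length ≠ 0 then                         -- 'elif lines:' (truthiness = nonempty)
      segs ++ [(PySem.Chars.strip (lines.getD 0 []), [])]
    else segs

def split_segments_by_headers (content : String) : List (String × String) :=
  -- parts = content.split("\n## ")
  let parts := PySem.Chars.splitOn content.toList ['\n', '#', '#', ' ']
  ((PySem.List.enumerate parts).foldl stepA []).map (fun p => (String.ofList p.1, String.ofList p.2))

-- ===== PORT B =====
abbrev BState := List (List Char × List Char) × Option (List Char) × List (List Char)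

-- loop body of B's 'for i, line in enumerate(content.split("\n"))'
def stepB (st : BState) (il : Int × List Char) : BState :=
  if 0 < il.1 ∧ PySem.Chars.startswith il.2 ['#', '#', ' '] = true then
    match st with
    | (segs, some t, body) =>
        (segs ++ [(t, PySem.Chars.strip (PySem.Chars.join ['\n'] body))],
         some (PySem.Chars.strip (il.2.drop 3)), [])      -- line[3:].strip(): in-range slice = drop 3
    | (segs, none, _) => (segs, some (PySem.Chars.strip (il.2.drop 3)), [])
  else
    match st with
    | (segs, some t, body) => (segs, some t, body ++ [il.2])
    | (segs, none, body) => (segs, none, body)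

-- final 'if title is not None: segments.append(...)'
def flushB (st : BState) : List (List Char × List Char) :=
  match st with
  | (segs, some t, body) => segs ++ [(t, PySem.Chars.strip (PySem.Chars.join ['\n'] body))]
  | (segs, none, _) => segs

def split_segments_by_headers_alt (content : String) : List (String × String) :=
  let lines := PySem.Chars.splitOn content.toList ['\n']
  (flushB ((PySem.List.enumerate lines).foldl stepB ([], none, []))).map
    (fun p => (String.ofList p.1, String.ofList p.2))

-- ===== PRECONDITION & SPEC =====
def Spec_split_segments_by_headers (content : String) (out : List (String × String)) : Prop := out = split_segments_by_headers_alt content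
instance (content : String) (out : List (String × String)) : Decidable (Spec_split_segments_by_headers content out) := by unfold Spec_split_segments_by_headers; infer_instance

-- ===== CLAIM (what is proved, stated in full; the proofs are below) =====
def Claim_equal_split_segments_by_headers : Prop := ∀ (content : String), Dom_split_segments_by_headers content → Spec_split_segments_by_headers content (split_segments_by_headers content)

-- ===== LEMMAS AND PROOFS =====

def sP (s0 : Char) (sep' : List Char) : List Char → List Char × List (List Char)
  | [] => ([], [])
  | c :: rest =>
    if (s0 :: sep').isPrefixOf (c :: rest) then
      let p := sP s0 sep' ((c :: rest).drop (sep'.length + 1))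
      ([], p.1 :: p.2)
    else
      let p := sP s0 sep' rest
      (c :: p.1, p.2)
termination_by l => l.length
decreasing_by all_goals (simp; try omega)

theorem go_eq (s0 : Char) (sep' : List Char) :
    ∀ fuel l cur acc, l.length < fuel →
      PySem.Chars.splitOn.go (s0 :: sep') fuel l cur acc =
        acc.reverse ++ (cur.reverse ++ (sP s0 sep' l).1) :: (sP s0 sep' l).2 := by
  intro fuel
  induction fuel with
  | zero => intro l cur acc h; omega
  | succ n ih =>
    intro l cur acc h
    match l with
    | [] => simp [PySem.Chars.splitOn.go, sP]
    | c :: rest =>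
      rw [PySem.Chars.splitOn.go]
      rw [sP]
      by_cases hp : (s0 :: sep').isPrefixOf (c :: rest) = true
      · simp only [hp, if_true]
        rw [ih]
        · simp
        · simp at h ⊢; omega
      · simp only [hp]
        rw [ih rest (c :: cur) acc (by simp at h ⊢; omega)]
        simp

theorem splitOn_eq (s0 : Char) (sep' : List Char) (l : List Char) :
    PySem.Chars.splitOn l (s0 :: sep') = (sP s0 sep' l).1 :: (sP s0 sep' l).2 := by
  rw [PySem.Chars.splitOn, go_eq s0 sep' (l.length + 1) l [] [] (by omega)]
  simp

def mP (s0 : Char) (sep' : List Char) : List Char → List Char × Option (List Char)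
  | [] => ([], none)
  | c :: rest =>
    if (s0 :: sep').isPrefixOf (c :: rest) then ([], some ((c :: rest).drop (sep'.length + 1)))
    else
      let p := mP s0 sep' rest
      (c :: p.1, p.2)

theorem mgo_zero (sep : List Char) :
    ∀ fuel l cur acc, PySem.Chars.splitOnMax.go sep fuel 0 l cur acc = ((cur.reverse ++ l) :: acc).reverse := by
  intro fuel l cur acc
  match fuel, l with
  | 0, l => rw [PySem.Chars.splitOnMax.go]
  | n + 1, [] => rw [PySem.Chars.splitOnMax.go] <;> simp
  | n + 1, c :: rest => rw [PySem.Chars.splitOnMax.go] <;> simp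

theorem mgo_one (s0 : Char) (sep' : List Char) :
    ∀ fuel l cur acc, l.length < fuel →
      PySem.Chars.splitOnMax.go (s0 :: sep') fuel 1 l cur acc =
        acc.reverse ++ (match (mP s0 sep' l).2 with
          | none => [cur.reverse ++ (mP s0 sep' l).1]
          | some r => [cur.reverse ++ (mP s0 sep' l).1, r]) := by
  intro fuel
  induction fuel with
  | zero => intro l cur acc h; omega
  | succ n ih =>
    intro l cur acc h
    match l with
    | [] => rw [PySem.Chars.splitOnMax.go, mP] <;> simp
    | c :: rest =>
      rw [PySem.Chars.splitOnMax.go, mP]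
      rw [if_neg (by decide : ¬((1 : Nat) = 0))]
      by_cases hp : (s0 :: sep').isPrefixOf (c :: rest) = true
      · simp only [hp, if_true]
        rw [mgo_zero]
        simp
      · simp only [hp]
        rw [ih rest (c :: cur) acc (by simp at h ⊢; omega)]
        simp

theorem splitOnMax_one (s0 : Char) (sep' : List Char) (l : List Char) :
    PySem.Chars.splitOnMax l (s0 :: sep') 1 =
      (match (mP s0 sep' l).2 with
        | none => [(mP s0 sep' l).1]
        | some r => [(mP s0 sep' l).1, r]) := by
  rw [PySem.Chars.splitOnMax, if_neg (by omega)]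
  rw [show Int.toNat 1 = 1 from rfl, mgo_one s0 sep' (l.length + 1) l [] [] (by omega)]
  simp

theorem sP_append (s0 : Char) (sep' : List Char) :
    ∀ (a l : List Char), s0 ∉ a →
      sP s0 sep' (a ++ l) = (a ++ (sP s0 sep' l).1, (sP s0 sep' l).2) := by
  intro a
  induction a with
  | nil => intro l _; simp
  | cons c a' ih =>
    intro l hc
    have hne : ¬ ((s0 :: sep').isPrefixOf (c :: (a' ++ l)) = true) := by
      simp only [List.isPrefixOf_cons₂]
      intro h
      have := (Bool.and_eq_true _ _).mp h
      simp at this hc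
      exact hc.1 this.1
    rw [List.cons_append, sP, if_neg hne, ih l (by simp at hc; exact fun h => hc.2 h)]
    simp

theorem mP_append (s0 : Char) (sep' : List Char) :
    ∀ (a l : List Char), s0 ∉ a →
      mP s0 sep' (a ++ l) = (a ++ (mP s0 sep' l).1, (mP s0 sep' l).2) := by
  intro a
  induction a with
  | nil => intro l _; simp
  | cons c a' ih =>
    intro l hc
    have hne : ¬ ((s0 :: sep').isPrefixOf (c :: (a' ++ l)) = true) := by
      simp only [List.isPrefixOf_cons₂]
      intro h
      have := (Bool.and_eq_true _ _).mp h
      simp at this hc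
      exact hc.1 this.1
    rw [List.cons_append, mP, if_neg hne, ih l (by simp at hc; exact fun h => hc.2 h)]
    simp

theorem prefix_skip (c0 : Char) :
    ∀ (p a t : List Char), c0 ∉ p → p.isPrefixOf (a ++ c0 :: t) = p.isPrefixOf a := by
  intro p a
  induction a generalizing p with
  | nil =>
    intro t hc
    match p with
    | [] => simp
    | d :: p' =>
      simp only [List.nil_append, List.isPrefixOf_cons₂, List.isPrefixOf]
      simp at hc
      have hd : (d == c0) = false := by simp; exact fun h => hc.1 h.symm
      simp [hd]
  | cons x a' ih =>
    intro t hc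
    match p with
    | [] => simp [List.isPrefixOf]
    | d :: p' =>
      simp only [List.cons_append, List.isPrefixOf_cons₂]
      rw [ih p' t (by simp at hc; exact fun h => hc.2 h)]

def jT (bs : List (List Char)) : List Char := (bs.map (fun b => '\n' :: b)).flatten

theorem jT_nil : jT [] = [] := rfl
theorem jT_cons (b : List Char) (bs : List (List Char)) : jT (b :: bs) = '\n' :: (b ++ jT bs) := by
  simp [jT]
theorem jT_snoc (bs : List (List Char)) (l : List Char) : jT (bs ++ [l]) = jT bs ++ '\n' :: l := by
  simp [jT]

theorem Hpref_append (b : List Char) (bs : List (List Char)) (hb : ¬ (['#', '#', ' '] : List Char).isPrefixOf b = true) :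
    (['#', '#', ' '] : List Char).isPrefixOf (b ++ jT bs) = false := by
  match bs with
  | [] => simp [jT_nil, hb]
  | x :: xs =>
    rw [jT_cons, prefix_skip '\n' _ b _ (by decide)]
    simp [hb]

theorem sP_free (s0 : Char) (sep' : List Char) (t0 : List Char) (h : s0 ∉ t0) :
    sP s0 sep' t0 = (t0, []) := by
  have := sP_append s0 sep' t0 [] h
  simpa [sP] using this

-- sP never finds the separator "\n## " inside a block t0 ++ jT bs of non-header lines
theorem sP_noMatch :
    ∀ (bs : List (List Char)) (t0 : List Char), '\n' ∉ t0 →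
      (∀ b ∈ bs, '\n' ∉ b ∧ ¬ (['#', '#', ' '] : List Char).isPrefixOf b = true) →
      sP '\n' ['#', '#', ' '] (t0 ++ jT bs) = (t0 ++ jT bs, []) := by
  intro bs
  induction bs with
  | nil => intro t0 h _; simp [jT_nil, sP_free '\n' _ t0 h]
  | cons b bs' ih =>
    intro t0 h hb
    rw [jT_cons, sP_append '\n' _ t0 _ h]
    have hpre : ¬ (('\n' :: ['#', '#', ' ']).isPrefixOf ('\n' :: (b ++ jT bs')) = true) := by
      simp only [List.isPrefixOf_cons₂]
      rw [Hpref_append b bs' (hb b (by simp)).2]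
      simp
    rw [sP, if_neg hpre, ih b (hb b (by simp)).1 (fun x hx => hb x (by simp [hx]))]

-- stepping over one block up to a header match: split at the "\n## " before t
theorem sP_block :
    ∀ (bs : List (List Char)) (t0 : List Char), '\n' ∉ t0 →
      (∀ b ∈ bs, '\n' ∉ b ∧ ¬ (['#', '#', ' '] : List Char).isPrefixOf b = true) →
      ∀ t : List Char, (['#', '#', ' '] : List Char).isPrefixOf t = true →
      sP '\n' ['#', '#', ' '] ((t0 ++ jT bs) ++ '\n' :: t) =
        (t0 ++ jT bs, (sP '\n' ['#', '#', ' '] (t.drop 3)).1 :: (sP '\n' ['#', '#', ' '] (t.drop 3)).2) := by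
  intro bs
  induction bs with
  | nil =>
    intro t0 h _ t ht
    rw [jT_nil, List.append_nil, sP_append '\n' _ t0 _ h]
    have hpre : (('\n' :: ['#', '#', ' ']).isPrefixOf ('\n' :: t) = true) := by
      simp only [List.isPrefixOf_cons₂, ht]
      simp
    rw [sP, if_pos hpre]
    simp
  | cons b bs' ih =>
    intro t0 h hb t ht
    have hassoc : ((t0 ++ jT (b :: bs')) ++ '\n' :: t) = t0 ++ '\n' :: ((b ++ jT bs') ++ '\n' :: t) := by
      rw [jT_cons]; simp
    rw [hassoc, sP_append '\n' _ t0 _ h]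
    obtain ⟨y, hy⟩ : ∃ y, jT bs' ++ '\n' :: t = '\n' :: y := by
      cases bs' with
      | nil => exact ⟨t, by simp [jT_nil]⟩
      | cons x xs => exact ⟨(x ++ jT xs) ++ '\n' :: t, by rw [jT_cons]; simp⟩
    have hpre : ¬ (('\n' :: ['#', '#', ' ']).isPrefixOf ('\n' :: ((b ++ jT bs') ++ '\n' :: t)) = true) := by
      simp only [List.isPrefixOf_cons₂, List.append_assoc, hy]
      rw [prefix_skip '\n' _ b y (by decide)]
      simp [(hb b (by simp)).2]
    rw [sP, if_neg hpre, ih b (hb b (by simp)).1 (fun x hx => hb x (by simp [hx])) t ht]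
    rw [jT_cons]

def gA (cur : List Char) : List (List Char) → List (List Char)
  | [] => [cur]
  | l :: ls =>
    if (['#', '#', ' '] : List Char).isPrefixOf l then cur :: gA (l.drop 3) ls
    else gA (cur ++ '\n' :: l) ls

theorem splitOn_gA :
    ∀ (rest : List (List Char)) (t0 : List Char) (bs : List (List Char)), '\n' ∉ t0 →
      (∀ b ∈ bs, '\n' ∉ b ∧ ¬ (['#', '#', ' '] : List Char).isPrefixOf b = true) →
      (∀ l ∈ rest, '\n' ∉ l) →
      PySem.Chars.splitOn ((t0 ++ jT bs) ++ jT rest) ('\n' :: ['#', '#', ' ']) =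
        gA (t0 ++ jT bs) rest := by
  intro rest
  induction rest with
  | nil =>
    intro t0 bs h hb _
    rw [jT_nil, List.append_nil, splitOn_eq, sP_noMatch bs t0 h hb, gA]
  | cons l ls ih =>
    intro t0 bs h hb hr
    by_cases hl : (['#', '#', ' '] : List Char).isPrefixOf l = true
    · have h3 : 3 ≤ l.length := by
        have := List.IsPrefix.length_le (List.isPrefixOf_iff_prefix.mp hl)
        simpa using this
      have hlp : (['#', '#', ' '] : List Char).isPrefixOf (l ++ jT ls) = true := by
        apply List.isPrefixOf_iff_prefix.mpr
        exact (List.isPrefixOf_iff_prefix.mp hl).trans (List.prefix_append l (jT ls))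
      rw [jT_cons, splitOn_eq, sP_block bs t0 h hb (l ++ jT ls) hlp]
      have hdrop : (l ++ jT ls).drop 3 = l.drop 3 ++ jT ls := List.drop_append_of_le_length h3
      rw [hdrop]
      have ihx := ih (l.drop 3) [] (fun hx => (hr l (by simp)) (List.mem_of_mem_drop hx))
        (by simp) (fun x hx => hr x (by simp [hx]))
      rw [jT_nil, List.append_nil] at ihx
      rw [splitOn_eq] at ihx
      rw [ihx, gA, if_pos hl]
    · have : (t0 ++ jT bs) ++ jT (l :: ls) = (t0 ++ jT (bs ++ [l])) ++ jT ls := by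
        rw [jT_cons, jT_snoc]; simp
      rw [this, ih t0 (bs ++ [l])
        h
        (by
          intro y hy
          rcases List.mem_append.mp hy with hy | hy
          · exact hb y hy
          · simp at hy; subst hy
            exact ⟨hr _ (by simp), hl⟩)
        (fun x hx => hr x (by simp [hx]))]
      rw [gA, if_neg hl, jT_snoc]
      simp

theorem sP_nl_join : ∀ l : List Char, l = (sP '\n' [] l).1 ++ jT (sP '\n' [] l).2 := by
  intro l
  induction l with
  | nil => simp [sP, jT_nil]
  | cons c rest ih =>
    by_cases hc : c = '\n'
    · subst hc
      rw [sP, if_pos (by simp [List.isPrefixOf])]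
      simp only [List.length_nil, List.drop_succ_cons, List.drop_zero]
      rw [jT_cons]
      exact congrArg _ ih
    · rw [sP, if_neg (by simp [List.isPrefixOf]; intro h; exact absurd h.symm hc)]
      simpa using congrArg (c :: ·) ih

theorem sP_nl_free : ∀ l : List Char,
    '\n' ∉ (sP '\n' [] l).1 ∧ ∀ b ∈ (sP '\n' [] l).2, '\n' ∉ b := by
  intro l
  induction l with
  | nil => simp [sP]
  | cons c rest ih =>
    by_cases hc : c = '\n'
    · subst hc
      rw [sP, if_pos (by simp [List.isPrefixOf])]
      simp only [List.length_nil, List.drop_succ_cons, List.drop_zero]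
      refine ⟨by simp, ?_⟩
      intro b hb
      rcases List.mem_cons.mp hb with h | h
      · subst h; exact ih.1
      · exact ih.2 b h
    · rw [sP, if_neg (by simp [List.isPrefixOf]; intro h; exact absurd h.symm hc)]
      refine ⟨?_, ih.2⟩
      simp only [List.mem_cons]
      rintro (h | h)
      · exact hc h.symm
      · exact ih.1 h

theorem mP_char (t0 : List Char) (bs : List (List Char)) (h : '\n' ∉ t0) :
    mP '\n' [] (t0 ++ jT bs) =
      (t0, match bs with | [] => none | b :: bs' => some (b ++ jT bs')) := by
  rw [mP_append '\n' [] t0 _ h]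
  cases bs with
  | nil => simp [jT_nil, mP]
  | cons b bs' =>
    rw [jT_cons, mP, if_pos (by simp [List.isPrefixOf])]
    simp

theorem join_nil : PySem.Chars.join ['\n'] [] = [] := by
  simp [PySem.Chars.join, List.intercalate]

theorem join_cons (b : List Char) (bs' : List (List Char)) :
    PySem.Chars.join ['\n'] (b :: bs') = b ++ jT bs' := by
  induction bs' generalizing b with
  | nil => simp [PySem.Chars.join, List.intercalate, jT_nil]
  | cons x xs ih =>
    have h2 : PySem.Chars.join ['\n'] (b :: x :: xs) = b ++ '\n' :: PySem.Chars.join ['\n'] (x :: xs) := by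
      simp [PySem.Chars.join, List.intercalate]
    rw [h2, ih x, jT_cons]

def procA (part : List Char) : List Char × List Char :=
  match (mP '\n' [] part).2 with
  | some r => (PySem.Chars.strip (mP '\n' [] part).1, PySem.Chars.strip r)
  | none => (PySem.Chars.strip (mP '\n' [] part).1, [])

-- stepB with the index test already discharged (index ≥ 1)
def stepBp (st : BState) (line : List Char) : BState :=
  if PySem.Chars.startswith line ['#', '#', ' '] = true then
    match st with
    | (segs, some t, body) =>
        (segs ++ [(t, PySem.Chars.strip (PySem.Chars.join ['\n'] body))],
         some (PySem.Chars.strip (line.drop 3)), [])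
    | (segs, none, _) => (segs, some (PySem.Chars.strip (line.drop 3)), [])
  else
    match st with
    | (segs, some t, body) => (segs, some t, body ++ [line])
    | (segs, none, body) => (segs, none, body)

theorem stepA_eval (segs : List (List Char × List Char)) (i : Int) (hi : 1 ≤ i) (part : List Char) :
    stepA segs (i, part) = segs ++ [procA part] := by
  rw [stepA, if_neg (by simp; omega)]
  simp only [splitOnMax_one '\n' [] part]
  rcases hm : (mP '\n' [] part).2 with _ | r
  · simp [procA, hm]
  · simp [procA, hm]

theorem foldA_enum :
    ∀ (ps : List (List Char)) (s : Int) (segs : List (List Char × List Char)), 1 ≤ s →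
      (PySem.List.enumerate ps s).foldl stepA segs = segs ++ ps.map procA := by
  intro ps
  induction ps with
  | nil => intro s segs _; simp [PySem.List.enumerate_nil]
  | cons p ps ih =>
    intro s segs hs
    rw [PySem.List.enumerate_cons, List.foldl_cons, stepA_eval segs s hs p, ih (s + 1) _ (by omega)]
    simp

theorem foldA_zero (ps : List (List Char)) :
    (PySem.List.enumerate ps).foldl stepA [] = ps.tail.map procA := by
  cases ps with
  | nil => simp [PySem.List.enumerate_nil]
  | cons p ps =>
    rw [PySem.List.enumerate_cons, List.foldl_cons]
    have h0 : stepA [] ((0 : Int), p) = [] := by rw [stepA, if_pos (by simp)]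
    rw [h0, show (0:Int)+1 = 1 from rfl, foldA_enum ps 1 [] (by omega)]
    simp

theorem foldB_enum :
    ∀ (ls : List (List Char)) (s : Int) (st : BState), 1 ≤ s →
      (PySem.List.enumerate ls s).foldl stepB st = ls.foldl stepBp st := by
  intro ls
  induction ls with
  | nil => intro s st _; simp [PySem.List.enumerate_nil]
  | cons l ls ih =>
    intro s st hs
    rw [PySem.List.enumerate_cons, List.foldl_cons, List.foldl_cons]
    have : stepB st (s, l) = stepBp st l := by
      unfold stepB stepBp
      by_cases hl : PySem.Chars.startswith l ['#', '#', ' '] = true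
      · rw [if_pos (by exact ⟨by omega, hl⟩), if_pos hl]
      · rw [if_neg (by intro h; exact hl h.2), if_neg hl]
    rw [this, ih (s + 1) _ (by omega)]

theorem strip_nil : PySem.Chars.strip [] = [] := by decide

theorem foldBp_some :
    ∀ (ls : List (List Char)) (segs : List (List Char × List Char)) (t0 : List Char)
      (bs : List (List Char)), '\n' ∉ t0 → (∀ l ∈ ls, '\n' ∉ l) →
      flushB (ls.foldl stepBp (segs, some (PySem.Chars.strip t0), bs)) =
        segs ++ (gA (t0 ++ jT bs) ls).map procA := by
  intro ls
  induction ls with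
  | nil =>
    intro segs t0 bs h _
    rw [List.foldl_nil, gA]
    cases bs with
    | nil =>
      simp only [flushB, join_nil, strip_nil, List.map_cons, List.map_nil]
      rw [procA, mP_char t0 [] h]
    | cons b bs' =>
      simp only [flushB, join_cons, List.map_cons, List.map_nil]
      rw [procA, mP_char t0 (b :: bs') h]
  | cons l ls ih =>
    intro segs t0 bs h hl
    rw [List.foldl_cons]
    by_cases hh : (['#', '#', ' '] : List Char).isPrefixOf l = true
    · have hstep : stepBp (segs, some (PySem.Chars.strip t0), bs) l =
          (segs ++ [(PySem.Chars.strip t0, PySem.Chars.strip (PySem.Chars.join ['\n'] bs))],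
           some (PySem.Chars.strip (l.drop 3)), []) := by
        unfold stepBp
        rw [if_pos (by simpa [PySem.Chars.startswith] using hh)]
      rw [hstep, ih _ (l.drop 3) [] (fun hx => (hl l (by simp)) (List.mem_of_mem_drop hx))
        (fun x hx => hl x (by simp [hx]))]
      rw [gA, if_pos hh]
      simp only [jT_nil, List.append_nil, List.map_cons, List.append_assoc, List.cons_append,
        List.nil_append]
      congr 2
      cases bs with
      | nil =>
        rw [procA, mP_char t0 [] h]
        simp [strip_nil]
      | cons b bs' =>
        rw [procA, mP_char t0 (b :: bs') h]
        simp [join_cons]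
    · have hstep : stepBp (segs, some (PySem.Chars.strip t0), bs) l =
          (segs, some (PySem.Chars.strip t0), bs ++ [l]) := by
        unfold stepBp
        rw [if_neg (by simpa [PySem.Chars.startswith] using hh)]
      rw [hstep, ih segs t0 (bs ++ [l]) h (fun x hx => hl x (by simp [hx]))]
      rw [gA, if_neg hh, jT_snoc]
      simp

theorem foldBp_none :
    ∀ (ls : List (List Char)) (segs : List (List Char × List Char)) (bs : List (List Char))
      (cur : List Char), (∀ l ∈ ls, '\n' ∉ l) →
      flushB (ls.foldl stepBp (segs, none, bs)) = segs ++ ((gA cur ls).tail).map procA := by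
  intro ls
  induction ls with
  | nil => intro segs bs cur _; simp [flushB, gA]
  | cons l ls ih =>
    intro segs bs cur hl
    rw [List.foldl_cons]
    by_cases hh : (['#', '#', ' '] : List Char).isPrefixOf l = true
    · have hstep : stepBp (segs, none, bs) l = (segs, some (PySem.Chars.strip (l.drop 3)), []) := by
        unfold stepBp
        rw [if_pos (by simpa [PySem.Chars.startswith] using hh)]
      rw [hstep, foldBp_some ls segs (l.drop 3) []
        (fun hx => (hl l (by simp)) (List.mem_of_mem_drop hx)) (fun x hx => hl x (by simp [hx]))]
      rw [gA, if_pos hh]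
      rw [jT_nil, List.append_nil]
      simp
    · have hstep : stepBp (segs, none, bs) l = (segs, none, bs) := by
        unfold stepBp
        rw [if_neg (by simpa [PySem.Chars.startswith] using hh)]
      rw [hstep, ih segs bs (cur ++ '\n' :: l) (fun x hx => hl x (by simp [hx]))]
      rw [gA, if_neg hh]

theorem lists_eq (L : List Char) :
    (PySem.List.enumerate (PySem.Chars.splitOn L ['\n', '#', '#', ' '])).foldl stepA [] =
      flushB ((PySem.List.enumerate (PySem.Chars.splitOn L ['\n'])).foldl stepB ([], none, [])) := by
  have hsplit : PySem.Chars.splitOn L ['\n'] = (sP '\n' [] L).1 :: (sP '\n' [] L).2 :=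
    splitOn_eq '\n' [] L
  have hJ : L = (sP '\n' [] L).1 ++ jT (sP '\n' [] L).2 := sP_nl_join L
  have hfree := sP_nl_free L
  have hA : PySem.Chars.splitOn L ['\n', '#', '#', ' '] = gA (sP '\n' [] L).1 (sP '\n' [] L).2 := by
    have h := splitOn_gA (sP '\n' [] L).2 (sP '\n' [] L).1 [] hfree.1 (by simp) hfree.2
    rw [jT_nil, List.append_nil] at h
    rw [← hJ] at h
    exact h
  rw [hA, foldA_zero]
  rw [hsplit, PySem.List.enumerate_cons, List.foldl_cons]
  have h0 : stepB ([], none, []) ((0 : Int), (sP '\n' [] L).1) = ([], none, []) := by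
    unfold stepB
    rw [if_neg (by intro h; exact absurd h.1 (by omega))]
  rw [h0, show (0 : Int) + 1 = 1 from rfl, foldB_enum _ 1 _ (by omega),
    foldBp_none (sP '\n' [] L).2 [] [] (sP '\n' [] L).1 hfree.2]
  simp

theorem ports_agree (content : String) :
    split_segments_by_headers content = split_segments_by_headers_alt content := by
  show (List.map _ (List.foldl stepA [] (PySem.List.enumerate (PySem.Chars.splitOn content.toList ['\n', '#', '#', ' '])))) = _
  rw [lists_eq content.toList]
  rfl

-- ===== VERDICT (by name: the statement is the Claim_ definition above) =====
theorem split_segments_by_headers_spec : Claim_equal_split_segments_by_headers := by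
  intro content _
  exact ports_agree content
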